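-- pv_equiv track=rewrite | github.com/xioamiya/calculate | tubao.py | merge_hulls
-- ===== SOURCE A (Python) =====
-- def merge_hulls(left_hull, right_hull):
--     """合并两个凸包"""
--     # TODO: implement merging logic
--     # For simplicity, let's use Graham scan to find the convex hull
--     points = left_hull + right_hull
--     points = sorted(set(points))
--
--     if len(points) <= 1:
--         return points
--
--     def cross(o, a, b):
--         return (a[0] - o[0]) * (b[1] - o[1]) - (a[1] - o[1]) * (b[0] - o[0])
--
--     lower = []
--     for p in points:
--         while len(lower) >= 2 and cross(lower[-2], lower[-1], p) <= 0:
--             lower.pop()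
--         lower.append(p)
--
--     upper = []
--     for p in reversed(points):
--         while len(upper) >= 2 and cross(upper[-2], upper[-1], p) <= 0:
--             upper.pop()
--         upper.append(p)
--
--     return lower[:-1] + upper[:-1]
-- ===== SOURCE B (Python) =====
-- def merge_hulls(left_hull, right_hull):
--     """Convex hull of the union by fixed-point relaxation: repeatedly delete
--     the first interior point of the chain that makes a non-left turn, until
--     the chain is convex; done once on the sorted chain (lower hull) and once
--     on the reversed chain (upper hull)."""
--     points = sorted(set(left_hull + right_hull))
--     if len(points) <= 1:
--         return points
--
--     def cross(o, a, b):
--         return (a[0] - o[0]) * (b[1] - o[1]) - (a[1] - o[1]) * (b[0] - o[0])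
--
--     def relax(chain):
--         chain = list(chain)
--         while True:
--             for i in range(1, len(chain) - 1):
--                 if cross(chain[i - 1], chain[i], chain[i + 1]) <= 0:
--                     del chain[i]
--                     break
--             else:
--                 return chain
--
--     return relax(points)[:-1] + relax(points[::-1])[:-1]
-- ===== Notes on version B (the rewrite author's own statement) =====
-- stated objective: alternative
-- what changed: B replaces A's one-pass monotone-chain stack sweeps by a fixed-point relaxation: it repeatedly scans the chain for the first interior point making a non-left turn and deletes it, until the chain is convex, once on the sorted points and once on their reversal; equality of the fixed point with the stack sweep on a sorted duplicate-free chain is what the Lean proof establishes.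
import Mathlib
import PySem

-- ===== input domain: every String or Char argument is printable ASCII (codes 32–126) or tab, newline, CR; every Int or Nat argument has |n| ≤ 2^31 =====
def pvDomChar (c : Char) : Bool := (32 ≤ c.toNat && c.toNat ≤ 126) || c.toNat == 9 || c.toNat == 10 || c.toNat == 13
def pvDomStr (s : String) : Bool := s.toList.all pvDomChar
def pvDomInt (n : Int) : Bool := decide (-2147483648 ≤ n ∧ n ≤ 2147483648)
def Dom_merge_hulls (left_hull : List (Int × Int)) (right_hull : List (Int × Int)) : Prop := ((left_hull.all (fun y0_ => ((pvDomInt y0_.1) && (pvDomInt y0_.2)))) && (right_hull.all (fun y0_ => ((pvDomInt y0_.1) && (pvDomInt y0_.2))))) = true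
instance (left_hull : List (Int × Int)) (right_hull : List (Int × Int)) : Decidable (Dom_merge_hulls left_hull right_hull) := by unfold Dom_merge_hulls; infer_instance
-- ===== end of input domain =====

-- B replaces A's monotone-chain stack sweeps by a fixed-point relaxation that
-- repeatedly deletes the first interior point making a non-left turn; objective: alternative.

-- ===== PORT A =====
-- cross(o, a, b)
def pvCrossA (o a b : Int × Int) : Int :=
  (a.1 - o.1) * (b.2 - o.2) - (a.2 - o.2) * (b.1 - o.1)

-- the 'while len(st) >= 2 and cross(st[-2], st[-1], p) <= 0: st.pop()' loop;
-- the stack is kept head-first (head = Python st[-1])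
def pvPopA (p : Int × Int) : List (Int × Int) → List (Int × Int)
  | b :: a :: rest => if pvCrossA a b p ≤ 0 then pvPopA p (a :: rest) else b :: a :: rest
  | s => s

def merge_hulls (left_hull : List (Int × Int)) (right_hull : List (Int × Int)) : List (Int × Int) :=
  -- points = sorted(set(left_hull + right_hull)); tuple comparison = sort by (fst, snd)
  let points := PySem.List.sorted2 (PySem.Set.ofList (left_hull ++ right_hull))
    (fun q => q.1) (fun q => q.2)
  if points.length ≤ 1 then points
  else
    let lower := (points.foldl (fun s p => p :: pvPopA p s) []).reverse
    let upper := (points.reverse.foldl (fun s p => p :: pvPopA p s) []).reverse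
    -- lower[:-1] + upper[:-1]  (xs[:-1] = dropLast)
    lower.dropLast ++ upper.dropLast

-- ===== PORT B =====
-- B's cross(o, a, b)
def pvCrossB (o a b : Int × Int) : Int :=
  (a.1 - o.1) * (b.2 - o.2) - (a.2 - o.2) * (b.1 - o.1)

-- one scan of B's 'for i in range(1, len(chain)-1): … del chain[i]; break':
-- delete the FIRST interior point making a non-left turn; none = no violation found
def pvDel : List (Int × Int) → Option (List (Int × Int))
  | o :: a :: b :: rest =>
    if pvCrossB o a b ≤ 0 then some (o :: b :: rest)
    else (pvDel (a :: b :: rest)).map (o :: ·)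
  | _ => none

theorem pvDel_length : ∀ {xs ys : List (Int × Int)}, pvDel xs = some ys → ys.length < xs.length := by
  intro xs
  induction xs with
  | nil => intro ys h; simp [pvDel] at h
  | cons o t ih =>
    intro ys h
    match t, h with
    | [], h => simp [pvDel] at h
    | [a], h => simp [pvDel] at h
    | a :: b :: rest, h =>
      rw [pvDel] at h
      split at h
      · cases h; simp
      · rcases Option.map_eq_some_iff.mp h with ⟨zs, hz, rfl⟩
        have := ih hz
        simpa using Nat.succ_lt_succ this

-- B's 'while True' relaxation loop: delete until no violation remains
def pvRelax (xs : List (Int × Int)) : List (Int × Int) :=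
  match h : pvDel xs with
  | none => xs
  | some ys => pvRelax ys
termination_by xs.length
decreasing_by exact pvDel_length h

def merge_hulls_alt (left_hull : List (Int × Int)) (right_hull : List (Int × Int)) : List (Int × Int) :=
  let points := PySem.List.sorted2 (PySem.Set.ofList (left_hull ++ right_hull))
    (fun q => q.1) (fun q => q.2)
  if points.length ≤ 1 then points
  else
    -- relax(points)[:-1] + relax(points[::-1])[:-1]
    (pvRelax points).dropLast ++ (pvRelax points.reverse).dropLast

-- ===== PRECONDITION & SPEC =====
def Spec_merge_hulls (left_hull : List (Int × Int)) (right_hull : List (Int × Int)) (out : List (Int × Int)) : Prop := out = merge_hulls_alt left_hull right_hull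
instance (left_hull : List (Int × Int)) (right_hull : List (Int × Int)) (out : List (Int × Int)) : Decidable (Spec_merge_hulls left_hull right_hull out) := by unfold Spec_merge_hulls; infer_instance

-- ===== CLAIM (what is proved, stated in full; the proofs are below) =====
def Claim_equal_merge_hulls : Prop := ∀ (left_hull : List (Int × Int)) (right_hull : List (Int × Int)), Dom_merge_hulls left_hull right_hull → Spec_merge_hulls left_hull right_hull (merge_hulls left_hull right_hull)

-- ===== LEMMAS AND PROOFS =====

-- strict lexicographic order on points (Python tuple '<')
def pvLex (p q : Int × Int) : Prop := p.1 < q.1 ∨ (p.1 = q.1 ∧ p.2 < q.2)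

theorem pvCrossB_eq (o a b : Int × Int) : pvCrossB o a b = pvCrossA o a b := rfl

theorem pvLex_trans {p q r : Int × Int} (h1 : pvLex p q) (h2 : pvLex q r) : pvLex p r := by
  unfold pvLex at *; omega

-- geometric core: left-turn transitivity on lex-ordered points
theorem pvGeo1 {z a b c : Int × Int} (hza : pvLex z a) (hab : pvLex a b) (hbc : pvLex b c)
    (h1 : pvCrossA z a b ≤ 0) (h2 : pvCrossA a b c ≤ 0) : pvCrossA z a c ≤ 0 := by
  have hz1 : z.1 ≤ a.1 := by rcases hza with h | ⟨h, _⟩ <;> omega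
  have hb1 : a.1 ≤ b.1 := by rcases hab with h | ⟨h, _⟩ <;> omega
  have hc1 : b.1 ≤ c.1 := by rcases hbc with h | ⟨h, _⟩ <;> omega
  unfold pvCrossA at *
  rcases hab with h | ⟨h, h'⟩
  · -- a.1 < b.1 : multiplier identity
    have key : ((a.1 - z.1) * (c.2 - z.2) - (a.2 - z.2) * (c.1 - z.1)) * (b.1 - a.1)
        = ((a.1 - z.1) * (b.2 - z.2) - (a.2 - z.2) * (b.1 - z.1)) * (c.1 - a.1)
          + ((b.1 - a.1) * (c.2 - a.2) - (b.2 - a.2) * (c.1 - a.1)) * (a.1 - z.1) := by ring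
    nlinarith [mul_nonpos_of_nonpos_of_nonneg h1 (by omega : (0:Int) ≤ c.1 - a.1),
      mul_nonpos_of_nonpos_of_nonneg h2 (by omega : (0:Int) ≤ a.1 - z.1),
      mul_pos (by omega : (0:Int) < b.1 - a.1) (by omega : (0:Int) < b.1 - a.1)]
  · -- a.1 = b.1, a.2 < b.2 : forces z on the same vertical line
    have e : (a.1 - z.1) * (b.2 - z.2) - (a.2 - z.2) * (b.1 - z.1) = (a.1 - z.1) * (b.2 - a.2) := by
      rw [← h]; ring
    rcases lt_or_eq_of_le hz1 with hlt | heq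
    · exfalso; nlinarith [mul_pos (by omega : (0:Int) < a.1 - z.1) (by omega : (0:Int) < b.2 - a.2)]
    · have hz2 : z.2 < a.2 := by rcases hza with hh | ⟨_, hh⟩ <;> omega
      have e2 : (a.1 - z.1) * (c.2 - z.2) - (a.2 - z.2) * (c.1 - z.1)
          = -((a.2 - z.2) * (c.1 - z.1)) := by rw [← heq]; ring
      rw [e2]
      nlinarith [mul_nonneg (by omega : (0:Int) ≤ a.2 - z.2) (by omega : (0:Int) ≤ c.1 - z.1)]

theorem pvGeo2 {z a b c : Int × Int} (hza : pvLex z a) (hab : pvLex a b) (hbc : pvLex b c)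
    (h1 : pvCrossA z a b ≤ 0) (h2 : pvCrossA a b c ≤ 0) : pvCrossA z b c ≤ 0 := by
  have hz1 : z.1 ≤ a.1 := by rcases hza with h | ⟨h, _⟩ <;> omega
  have hb1 : a.1 ≤ b.1 := by rcases hab with h | ⟨h, _⟩ <;> omega
  have hc1 : b.1 ≤ c.1 := by rcases hbc with h | ⟨h, _⟩ <;> omega
  unfold pvCrossA at *
  rcases hab with h | ⟨h, h'⟩
  · have key : ((b.1 - z.1) * (c.2 - z.2) - (b.2 - z.2) * (c.1 - z.1)) * (b.1 - a.1)
        = ((a.1 - z.1) * (b.2 - z.2) - (a.2 - z.2) * (b.1 - z.1)) * (c.1 - b.1)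
          + ((b.1 - a.1) * (c.2 - a.2) - (b.2 - a.2) * (c.1 - a.1)) * (b.1 - z.1) := by ring
    nlinarith [mul_nonpos_of_nonpos_of_nonneg h1 (by omega : (0:Int) ≤ c.1 - b.1),
      mul_nonpos_of_nonpos_of_nonneg h2 (by omega : (0:Int) ≤ b.1 - z.1),
      mul_pos (by omega : (0:Int) < b.1 - a.1) (by omega : (0:Int) < b.1 - a.1)]
  · have e : (a.1 - z.1) * (b.2 - z.2) - (a.2 - z.2) * (b.1 - z.1) = (a.1 - z.1) * (b.2 - a.2) := by
      rw [← h]; ring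
    rcases lt_or_eq_of_le hz1 with hlt | heq
    · exfalso; nlinarith [mul_pos (by omega : (0:Int) < a.1 - z.1) (by omega : (0:Int) < b.2 - a.2)]
    · have hz2 : z.2 < a.2 := by rcases hza with hh | ⟨_, hh⟩ <;> omega
      have e2 : (b.1 - z.1) * (c.2 - z.2) - (b.2 - z.2) * (c.1 - z.1)
          = -((b.2 - z.2) * (c.1 - z.1)) := by rw [← h, ← heq]; ring
      rw [e2]
      nlinarith [mul_nonneg (by omega : (0:Int) ≤ b.2 - z.2) (by omega : (0:Int) ≤ c.1 - z.1)]

theorem popA_sublist (p : Int × Int) (s : List (Int × Int)) : (pvPopA p s).Sublist s := by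
  induction s using pvPopA.induct p with
  | case1 b a rest h ih => rw [pvPopA, if_pos h]; exact ih.trans (List.sublist_cons_self _ _)
  | case2 b a rest h => rw [pvPopA, if_neg h]
  | case3 s h => cases s with
    | nil => exact List.Sublist.refl _
    | cons x t => cases t with
      | nil => exact List.Sublist.refl _
      | cons y r => exact absurd rfl (h x y r)

-- key step: with cross(a,b,c) ≤ 0 on a lex-sorted stack, pushing b then c
-- leaves the same stack as pushing c directly
theorem pvPopStep : ∀ (t : List (Int × Int)) (a b c : Int × Int),
    (∀ q ∈ t, pvLex q a) → t.Pairwise (fun x y => pvLex y x) →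
    pvLex a b → pvLex b c → pvCrossA a b c ≤ 0 →
    pvPopA c (b :: pvPopA b (a :: t)) = pvPopA c (a :: t) := by
  intro t
  induction t with
  | nil =>
    intro a b c _ _ hab hbc hcr
    show pvPopA c (b :: pvPopA b [a]) = pvPopA c [a]
    rw [show pvPopA b [a] = [a] from rfl]
    rw [pvPopA, if_pos hcr]
  | cons x r ih =>
    intro a b c hlt hpw hab hbc hcr
    have hxa : pvLex x a := hlt x (by simp)
    rw [show pvPopA b (a :: x :: r) =
        if pvCrossA x a b ≤ 0 then pvPopA b (x :: r) else a :: x :: r from rfl]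
    by_cases hpop : pvCrossA x a b ≤ 0
    · rw [if_pos hpop]
      have h1 := pvGeo1 hxa hab hbc hpop hcr
      have h2 := pvGeo2 hxa hab hbc hpop hcr
      have := ih x b c (fun q hq => (List.pairwise_cons.mp hpw).1 q hq)
        (List.pairwise_cons.mp hpw).2 (pvLex_trans hxa hab) hbc h2
      rw [this]
      rw [show pvPopA c (a :: x :: r) =
          if pvCrossA x a c ≤ 0 then pvPopA c (x :: r) else a :: x :: r from rfl, if_pos h1]
    · rw [if_neg hpop]
      rw [show pvPopA c (b :: a :: x :: r) =
          if pvCrossA a b c ≤ 0 then pvPopA c (a :: x :: r) else b :: a :: x :: r from rfl,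
        if_pos hcr]

-- deleting the first violating interior point does not change the stack sweep
theorem pvFoldDel : ∀ (xs ys s : List (Int × Int)),
    xs.Pairwise pvLex → (∀ q ∈ s, ∀ p ∈ xs, pvLex q p) → s.Pairwise (fun x y => pvLex y x) →
    pvDel xs = some ys →
    xs.foldl (fun s p => p :: pvPopA p s) s = ys.foldl (fun s p => p :: pvPopA p s) s := by
  intro xs
  induction xs with
  | nil => intro ys s _ _ _ h; simp [pvDel] at h
  | cons o t ih =>
    intro ys s hpw hlt hspw h
    rcases t with _ | ⟨a, t2⟩
    · simp [pvDel] at h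
    rcases t2 with _ | ⟨b, rest⟩
    · simp [pvDel] at h
    have hqo : ∀ q ∈ pvPopA o s, pvLex q o := fun q hq =>
      hlt q ((popA_sublist o s).mem hq) o (by simp)
    have hops : (o :: pvPopA o s).Pairwise (fun x y => pvLex y x) :=
      List.pairwise_cons.mpr ⟨hqo, hspw.sublist (popA_sublist o s)⟩
    have hoa : pvLex o a := (List.pairwise_cons.mp hpw).1 a (by simp)
    have hab : pvLex a b := (List.pairwise_cons.mp (List.pairwise_cons.mp hpw).2).1 b (by simp)
    rw [pvDel] at h
    split at h
    · rename_i hcr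
      injection h with h; subst h
      simp only [List.foldl_cons]
      have hstep := pvPopStep (pvPopA o s) o a b hqo
        (hspw.sublist (popA_sublist o s)) hoa hab (by rw [← pvCrossB_eq]; exact hcr)
      rw [hstep]
    · rename_i hcr
      rcases Option.map_eq_some_iff.mp h with ⟨t', ht', rfl⟩
      simp only [List.foldl_cons]
      exact ih t' ((fun s p => p :: pvPopA p s) s o) (List.pairwise_cons.mp hpw).2
        (by
          intro q hq p hp
          rcases List.mem_cons.mp hq with rfl | hq'
          · exact (List.pairwise_cons.mp hpw).1 p hp
          · exact hlt q ((popA_sublist o s).mem hq') p (List.mem_cons_of_mem _ hp))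
        hops ht'

-- when no violation remains, the stack sweep keeps every point
theorem pvFoldNoPop : ∀ (xs s : List (Int × Int)),
    pvDel ((s.take 2).reverse ++ xs) = none →
    xs.foldl (fun s p => p :: pvPopA p s) s = xs.reverse ++ s := by
  intro xs
  induction xs with
  | nil => intro s _; simp
  | cons p rest ih =>
    intro s h
    simp only [List.foldl_cons]
    have hnp : pvPopA p s = s := by
      rcases s with _ | ⟨y, s1⟩
      · rfl
      rcases s1 with _ | ⟨x, r⟩
      · rfl
      -- h is about (x :: y :: p :: rest)
      simp only [List.take, List.reverse_cons, List.reverse_nil, List.nil_append,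
        List.cons_append] at h
      rw [show pvDel (x :: y :: p :: rest)
          = if pvCrossB x y p ≤ 0 then some (x :: p :: rest)
            else (pvDel (y :: p :: rest)).map (x :: ·) from rfl] at h
      split at h
      · exact absurd h (by simp)
      · rename_i hcr
        rw [pvPopA, if_neg (by rw [pvCrossB_eq] at hcr; exact hcr)]
    rw [hnp]
    have hnext : pvDel (((p :: s).take 2).reverse ++ rest) = none := by
      rcases s with _ | ⟨y, s1⟩
      · simpa using h
      rcases s1 with _ | ⟨x, r⟩
      · simpa using h
      simp only [List.take, List.reverse_cons, List.reverse_nil, List.nil_append,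
        List.cons_append] at h ⊢
      rw [show pvDel (x :: y :: p :: rest)
          = if pvCrossB x y p ≤ 0 then some (x :: p :: rest)
            else (pvDel (y :: p :: rest)).map (x :: ·) from rfl] at h
      split at h
      · exact absurd h (by simp)
      · simpa using h
    rw [ih (p :: s) hnext]
    simp

theorem pvDel_sublist {xs ys : List (Int × Int)} (h : pvDel xs = some ys) : ys.Sublist xs := by
  induction xs generalizing ys with
  | nil => simp [pvDel] at h
  | cons o t ih =>
    rcases t with _ | ⟨a, t2⟩
    · simp [pvDel] at h
    rcases t2 with _ | ⟨b, rest⟩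
    · simp [pvDel] at h
    rw [pvDel] at h
    split at h
    · injection h with h; subst h
      exact List.Sublist.cons₂ o (List.sublist_cons_self a (b :: rest))
    · rcases Option.map_eq_some_iff.mp h with ⟨t', ht', rfl⟩
      exact List.Sublist.cons₂ o (ih ht')

-- the fixed point of the relaxation equals the stack sweep on a lex-sorted chain
theorem pvRelax_none {xs : List (Int × Int)} (h : pvDel xs = none) : pvRelax xs = xs := by
  rw [pvRelax]
  split
  · rfl
  · rename_i ys h'; rw [h] at h'; cases h'

theorem pvRelax_some {xs ys : List (Int × Int)} (h : pvDel xs = some ys) :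
    pvRelax xs = pvRelax ys := by
  rw [pvRelax]
  split
  · rename_i h'; rw [h] at h'; cases h'
  · rename_i zs h'; rw [h] at h'; injection h' with h'; rw [h']

theorem pvRelax_eq (xs : List (Int × Int)) (hs : xs.Pairwise pvLex) :
    pvRelax xs = (xs.foldl (fun s p => p :: pvPopA p s) []).reverse := by
  induction xs using pvRelax.induct with
  | case1 xs hnone =>
    rw [pvRelax_none hnone]
    have := pvFoldNoPop xs [] (by simpa using hnone)
    rw [this]; simp
  | case2 xs ys hsome ih =>
    rw [pvRelax_some hsome]
    rw [ih (hs.sublist (pvDel_sublist hsome))]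
    rw [pvFoldDel xs ys [] hs (by simp) (by simp) hsome]

-- transfer to the reversed (lex-decreasing) chain via point negation
def pvNegP (q : Int × Int) : Int × Int := (-q.1, -q.2)

theorem pvNegP_invol (q : Int × Int) : pvNegP (pvNegP q) = q := by simp [pvNegP]

theorem pvCrossA_neg (o a b : Int × Int) :
    pvCrossA (pvNegP o) (pvNegP a) (pvNegP b) = pvCrossA o a b := by
  simp [pvCrossA, pvNegP]; ring

theorem pvPopA_neg (p : Int × Int) (s : List (Int × Int)) :
    pvPopA (pvNegP p) (s.map pvNegP) = (pvPopA p s).map pvNegP := by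
  induction s using pvPopA.induct p with
  | case1 b a rest h ih =>
    rw [pvPopA, if_pos h]
    simp only [List.map_cons]
    rw [pvPopA, if_pos (by rw [pvCrossA_neg]; exact h)]
    exact ih
  | case2 b a rest h =>
    rw [pvPopA, if_neg h]
    simp only [List.map_cons]
    rw [pvPopA, if_neg (by rw [pvCrossA_neg]; exact h)]
  | case3 s h => cases s with
    | nil => rfl
    | cons x t => cases t with
      | nil => rfl
      | cons y r => exact absurd rfl (h x y r)

theorem pvFold_neg (xs s : List (Int × Int)) :
    (xs.map pvNegP).foldl (fun s p => p :: pvPopA p s) (s.map pvNegP)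
      = (xs.foldl (fun s p => p :: pvPopA p s) s).map pvNegP := by
  induction xs generalizing s with
  | nil => rfl
  | cons p rest ih =>
    simp only [List.map_cons, List.foldl_cons]
    rw [show pvNegP p :: pvPopA (pvNegP p) (s.map pvNegP)
        = (p :: pvPopA p s).map pvNegP by simp [pvPopA_neg]]
    exact ih _

theorem pvDel_neg (xs : List (Int × Int)) :
    pvDel (xs.map pvNegP) = (pvDel xs).map (List.map pvNegP) := by
  induction xs with
  | nil => rfl
  | cons o t ih =>
    rcases t with _ | ⟨a, t2⟩
    · rfl
    rcases t2 with _ | ⟨b, rest⟩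
    · rfl
    simp only [List.map_cons]
    rw [show pvDel (pvNegP o :: pvNegP a :: pvNegP b :: rest.map pvNegP)
        = if pvCrossB (pvNegP o) (pvNegP a) (pvNegP b) ≤ 0
          then some (pvNegP o :: pvNegP b :: rest.map pvNegP)
          else (pvDel (pvNegP a :: pvNegP b :: rest.map pvNegP)).map (pvNegP o :: ·) from rfl]
    rw [pvDel]
    rw [show pvCrossB (pvNegP o) (pvNegP a) (pvNegP b) = pvCrossB o a b from pvCrossA_neg o a b]
    split
    · rfl
    · rw [show pvDel (pvNegP a :: pvNegP b :: rest.map pvNegP)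
          = pvDel ((a :: b :: rest).map pvNegP) by simp]
      rw [ih]
      cases pvDel (a :: b :: rest) <;> rfl

theorem pvRelax_neg (xs : List (Int × Int)) :
    pvRelax (xs.map pvNegP) = (pvRelax xs).map pvNegP := by
  induction xs using pvRelax.induct with
  | case1 xs hnone =>
    rw [pvRelax_none hnone,
      pvRelax_none (show pvDel (xs.map pvNegP) = none by rw [pvDel_neg, hnone]; rfl)]
  | case2 xs ys hsome ih =>
    rw [pvRelax_some
        (show pvDel (xs.map pvNegP) = some (ys.map pvNegP) by rw [pvDel_neg, hsome]; rfl)]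
    rw [pvRelax_some hsome]
    exact ih

theorem pvLex_neg {p q : Int × Int} (h : pvLex p q) : pvLex (pvNegP q) (pvNegP p) := by
  unfold pvLex pvNegP at *; simp only [] at *; omega

theorem pvRelax_rev_eq (xs : List (Int × Int)) (hs : xs.Pairwise pvLex) :
    pvRelax xs.reverse = (xs.reverse.foldl (fun s p => p :: pvPopA p s) []).reverse := by
  have hm : (xs.reverse.map pvNegP).Pairwise pvLex := by
    rw [List.pairwise_map]
    rw [List.pairwise_reverse]
    exact hs.imp pvLex_neg
  have hinv : (xs.reverse.map pvNegP).map pvNegP = xs.reverse := by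
    rw [List.map_map]
    simp [Function.comp_def, pvNegP_invol]
  calc pvRelax xs.reverse
      = pvRelax ((xs.reverse.map pvNegP).map pvNegP) := by rw [hinv]
    _ = (pvRelax (xs.reverse.map pvNegP)).map pvNegP := pvRelax_neg _
    _ = (((xs.reverse.map pvNegP).foldl (fun s p => p :: pvPopA p s) []).reverse).map pvNegP := by
        rw [pvRelax_eq _ hm]
    _ = (xs.reverse.foldl (fun s p => p :: pvPopA p s) []).reverse := by
        conv_rhs => rw [← hinv]
        have hf := pvFold_neg (xs.reverse.map pvNegP) []
        simp only [List.map_nil] at hf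
        rw [hf, List.map_reverse]

-- lex-sortedness of sorted(set(...)) under the tuple key
def pvBefore (a b : Int × Int) : Bool :=
  decide (a.1 < b.1) || !decide (b.1 < a.1) && decide (a.2 < b.2)

theorem sorted2_eq (xs : List (Int × Int)) :
    PySem.List.sorted2 xs (fun q => q.1) (fun q => q.2)
      = xs.foldl (fun acc x => PySem.List.insertBy pvBefore x acc) [] := rfl

theorem insertBy_nil (v : Int × Int) : PySem.List.insertBy pvBefore v [] = [v] := rfl
theorem insertBy_cons (v y : Int × Int) (ys : List (Int × Int)) :
    PySem.List.insertBy pvBefore v (y :: ys)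
      = if pvBefore v y then v :: y :: ys else y :: PySem.List.insertBy pvBefore v ys := rfl

theorem pvBefore_asymm {a b : Int × Int} (h : pvBefore a b = true) : pvBefore b a = false := by
  simp [pvBefore] at *; omega

theorem pvBefore_negtrans {a b c : Int × Int} (h1 : pvBefore b a = false)
    (h2 : pvBefore c b = false) : pvBefore c a = false := by
  simp [pvBefore] at *; omega

theorem insertBy_pairwise (v : Int × Int) (ys : List (Int × Int))
    (h : ys.Pairwise (fun a b => pvBefore b a = false)) :
    (PySem.List.insertBy pvBefore v ys).Pairwise (fun a b => pvBefore b a = false) := by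
  induction ys with
  | nil => simp [insertBy_nil]
  | cons y ys ih =>
    rw [insertBy_cons]
    rcases List.pairwise_cons.mp h with ⟨hy, hys⟩
    by_cases hv : pvBefore v y = true
    · rw [if_pos hv]
      refine List.pairwise_cons.mpr ⟨?_, h⟩
      intro w hw
      rcases List.mem_cons.mp hw with rfl | hw'
      · exact pvBefore_asymm hv
      · exact pvBefore_negtrans (pvBefore_asymm hv) (hy w hw')
    · rw [if_neg hv]
      refine List.pairwise_cons.mpr ⟨?_, ih hys⟩
      intro w hw
      rcases (PySem.List.mem_insertBy pvBefore v w ys).mp hw with rfl | hw'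
      · exact eq_false_of_ne_true hv
      · exact hy w hw'

theorem foldl_insertBy_pairwise (xs acc : List (Int × Int))
    (h : acc.Pairwise (fun a b => pvBefore b a = false)) :
    (xs.foldl (fun acc x => PySem.List.insertBy pvBefore x acc) acc).Pairwise
      (fun a b => pvBefore b a = false) := by
  induction xs generalizing acc with
  | nil => exact h
  | cons x xs ih => exact ih _ (insertBy_pairwise x acc h)

theorem pvPoints_pairwise (l : List (Int × Int)) :
    (PySem.List.sorted2 (PySem.Set.ofList l) (fun q => q.1) (fun q => q.2)).Pairwise pvLex := by
  have hpw := foldl_insertBy_pairwise (PySem.Set.ofList l) [] (by simp)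
  rw [← sorted2_eq] at hpw
  have hnd : (PySem.List.sorted2 (PySem.Set.ofList l) (fun q => q.1) (fun q => q.2)).Nodup :=
    (PySem.List.sorted2_perm _ _ _ _).symm.nodup (PySem.Set.nodup_ofList l)
  have := hnd.imp (R := fun a b : Int × Int => a ≠ b) (fun h => h) |>.and hpw
  exact this.imp (by
    rintro ⟨a1,a2⟩ ⟨b1,b2⟩ ⟨hne, hb⟩
    simp [pvBefore] at hb
    simp [Prod.ext_iff] at hne
    unfold pvLex
    simp only []
    omega)

-- ===== VERDICT (by name: the statement is the Claim_ definition above) =====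
theorem merge_hulls_spec : Claim_equal_merge_hulls := by
  intro left right _
  show merge_hulls left right = merge_hulls_alt left right
  simp only [merge_hulls, merge_hulls_alt]
  have hpw := pvPoints_pairwise (left ++ right)
  generalize hpts : PySem.List.sorted2 (PySem.Set.ofList (left ++ right))
      (fun q => q.1) (fun q => q.2) = pts at hpw ⊢
  by_cases h : pts.length ≤ 1
  · rw [if_pos h, if_pos h]
  · rw [if_neg h, if_neg h, pvRelax_eq pts hpw, pvRelax_rev_eq pts hpw]
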